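-- pv_equiv track=rewrite | github.com/bhrdj/el_documents | scripts/lib/bullet_detection.py | detect_list_blocks
-- ===== SOURCE A (Python) =====
-- from typing import List, Tuple, Optional
--
-- def is_list_item(line: str) -> bool:
--     """Check if a line is a bullet list item.
--
--     Args:
--         line: Line to check
--
--     Returns:
--         True if line is a bullet list item
--     """
--     stripped = line.lstrip()
--     if not stripped:
--         return False
--
--     # Check for bullet markers: -, *, +
--     return stripped[0] in ['-', '*', '+'] and (len(stripped) == 1 or stripped[1] == ' ')
--
-- def detect_list_blocks(lines: List[str]) -> List[Tuple[int, int]]: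
--     """Detect contiguous bullet list blocks in document.
--
--     Args:
--         lines: Document lines
--
--     Returns:
--         List of (start_index, end_index) tuples for each list block
--     """
--     blocks = []
--     in_block = False
--     start_idx = 0
--
--     for i, line in enumerate(lines):
--         if is_list_item(line):
--             if not in_block:
--                 # Start new block
--                 in_block = True
--                 start_idx = i
--         else:
--             # Check if this is blank line within block (allowed)
--             if in_block and line.strip() == '':
--                 # Check next non-blank line
--                 next_idx = i + 1
--                 while next_idx < len(lines) and lines[next_idx].strip() == '':
--                     next_idx += 1
--
--                 if next_idx < len(lines) and is_list_item(lines[next_idx]):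
--                     # Blank line within block - continue
--                     continue
--                 else:
--                     # End of block
--                     blocks.append((start_idx, i - 1))
--                     in_block = False
--             elif in_block:
--                 # Non-list-item, non-blank line - end block
--                 blocks.append((start_idx, i - 1))
--                 in_block = False
--
--     # Handle block that extends to end of document
--     if in_block:
--         blocks.append((start_idx, len(lines) - 1))
--
--     return blocks
-- ===== SOURCE B (Python) =====
-- from typing import List, Tuple
--
-- def is_list_item(line: str) -> bool:
--     stripped = line.lstrip()
--     if not stripped:
--         return False
--     return stripped[0] in ['-', '*', '+'] and (len(stripped) == 1 or stripped[1] == ' ')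
--
-- def detect_list_blocks(lines: List[str]) -> List[Tuple[int, int]]:
--     """Single pass: track the open block's start and the last list-item index.
--
--     Blank lines never need a forward rescan: a blank run only ends a block if
--     it is followed by a non-item, and in that case the block's end is the last
--     list-item index either way, so blanks are simply skipped and the block is
--     closed lazily at the next non-blank non-item line (or at end of document).
--     """
--     blocks = []
--     start = None
--     last_item = 0
--     for i, line in enumerate(lines):
--         if is_list_item(line):
--             if start is None:
--                 start = i
--             last_item = i
--         elif line.strip() != '':
--             if start is not None:
--                 blocks.append((start, last_item))
--                 start = None
--         # blank line: nothing to do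
--     if start is not None:
--         blocks.append((start, last_item))
--     return blocks
-- ===== Notes on version B (the rewrite author's own statement) =====
-- stated objective: simpler
-- what changed: Replaces A's forward rescan of each blank run (an inner while loop deciding whether the block continues) by a single pass that tracks the last list-item index and closes blocks lazily at the next non-blank non-item line or at EOF.
import Mathlib
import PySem

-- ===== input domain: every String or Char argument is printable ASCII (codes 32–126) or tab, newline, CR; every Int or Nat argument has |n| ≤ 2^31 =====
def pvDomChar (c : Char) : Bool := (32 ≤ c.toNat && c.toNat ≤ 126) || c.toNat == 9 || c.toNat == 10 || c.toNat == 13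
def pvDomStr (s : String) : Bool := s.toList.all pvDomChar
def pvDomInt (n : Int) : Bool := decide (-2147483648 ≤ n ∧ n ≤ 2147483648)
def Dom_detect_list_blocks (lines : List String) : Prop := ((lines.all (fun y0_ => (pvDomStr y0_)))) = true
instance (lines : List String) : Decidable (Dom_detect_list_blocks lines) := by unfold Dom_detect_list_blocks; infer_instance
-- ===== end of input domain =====

-- B drops A's per-blank-line forward rescans: one pass tracking the last list-item index, closing blocks lazily (objective: simpler).


-- ===== PORT A =====
def is_list_item (line : String) : Bool :=
  match (PySem.Str.lstrip line).toList with
  | [] => false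
  | c :: rest =>
    (c == '-' || c == '*' || c == '+') &&
    (match rest with
     | [] => true
     | c2 :: _ => c2 == ' ')

-- A's inner `while next_idx < len(lines) ... next_idx += 1` scan: first line of the
-- remaining suffix whose strip() is non-empty (none = scan ran off the end).
def aScan : List String → Option String
  | [] => none
  | l :: ls => if PySem.Str.strip l = "" then aScan ls else some l

-- A's for-loop, state (blocks, in_block, start_idx); i is the enumerate index.
def aLoop : List String → Nat → List (Int × Int) → Bool → Nat → List (Int × Int) × Bool × Nat
  | [], _, blocks, in_block, start_idx => (blocks, in_block, start_idx)
  | line :: tl, i, blocks, in_block, start_idx =>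
    if is_list_item line then
      if !in_block then aLoop tl (i + 1) blocks true i
      else aLoop tl (i + 1) blocks in_block start_idx
    else
      if in_block && decide (PySem.Str.strip line = "") then
        match aScan tl with
        | some nxt =>
          if is_list_item nxt then aLoop tl (i + 1) blocks in_block start_idx
          else aLoop tl (i + 1) (blocks ++ [((start_idx : Int), (i : Int) - 1)]) false start_idx
        | none => aLoop tl (i + 1) (blocks ++ [((start_idx : Int), (i : Int) - 1)]) false start_idx
      else
        if in_block then aLoop tl (i + 1) (blocks ++ [((start_idx : Int), (i : Int) - 1)]) false start_idx
        else aLoop tl (i + 1) blocks in_block start_idx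

def detect_list_blocks (lines : List String) : List (Int × Int) :=
  match aLoop lines 0 [] false 0 with
  | (blocks, in_block, start_idx) =>
    if in_block then blocks ++ [((start_idx : Int), (lines.length : Int) - 1)] else blocks

-- ===== PORT B =====
-- B's single pass: state (blocks, start : Option Nat, last_item).
def bLoop : List String → Nat → List (Int × Int) → Option Nat → Nat → List (Int × Int) × Option Nat × Nat
  | [], _, blocks, start, last_item => (blocks, start, last_item)
  | line :: tl, i, blocks, start, last_item =>
    if is_list_item line then
      match start with
      | none => bLoop tl (i + 1) blocks (some i) i
      | some s => bLoop tl (i + 1) blocks (some s) i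
    else
      if PySem.Str.strip line ≠ "" then
        match start with
        | some s => bLoop tl (i + 1) (blocks ++ [((s : Int), (last_item : Int))]) none last_item
        | none => bLoop tl (i + 1) blocks none last_item
      else bLoop tl (i + 1) blocks start last_item

def detect_list_blocks_alt (lines : List String) : List (Int × Int) :=
  match bLoop lines 0 [] none 0 with
  | (blocks, start, last_item) =>
    match start with
    | some s => blocks ++ [((s : Int), (last_item : Int))]
    | none => blocks

-- ===== PRECONDITION & SPEC =====
def Spec_detect_list_blocks (lines : List String) (out : List (Int × Int)) : Prop := out = detect_list_blocks_alt lines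
instance (lines : List String) (out : List (Int × Int)) : Decidable (Spec_detect_list_blocks lines out) := by unfold Spec_detect_list_blocks; infer_instance

-- ===== CLAIM (what is proved, stated in full; the proofs are below) =====
def Claim_equal_detect_list_blocks : Prop := ∀ (lines : List String), Dom_detect_list_blocks lines → Spec_detect_list_blocks lines (detect_list_blocks lines)

-- ===== LEMMAS AND PROOFS =====
-- A blank line (strip() == '') is never a list item: its lstrip() is empty too.
lemma blank_not_item (line : String) (h : PySem.Str.strip line = "") :
    is_list_item line = false := by
  have h' : PySem.Chars.strip line.toList = [] := by
    have := congrArg String.toList h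
    simpa using this
  have hl : PySem.Chars.lstrip line.toList = [] := by
    by_contra hne
    have hall : ∀ c ∈ PySem.Chars.lstrip line.toList, PySem.Chars.isspace c = true := by
      have := h'
      simp [PySem.Chars.strip, PySem.Chars.rstrip] at this
      exact this
    have hne' : List.dropWhile PySem.Chars.isspace line.toList ≠ [] := by
      simpa [PySem.Chars.lstrip] using hne
    have hhead := List.head_dropWhile_not PySem.Chars.isspace hne'
    have hmem : (List.dropWhile PySem.Chars.isspace line.toList).head hne'
        ∈ PySem.Chars.lstrip line.toList := by
      simp [PySem.Chars.lstrip]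
    have := hall _ hmem
    rw [hhead] at this
    exact Bool.false_ne_true this
  simp [is_list_item, hl]

-- finishing steps of the two ports, as functions of the loop result
def aFinish (r : List (Int × Int) × Bool × Nat) (n : Nat) : List (Int × Int) :=
  match r with
  | (blocks, in_block, start_idx) =>
    if in_block then blocks ++ [((start_idx : Int), (n : Int) - 1)] else blocks

def bFinish (r : List (Int × Int) × Option Nat × Nat) : List (Int × Int) :=
  match r with
  | (blocks, start, last_item) =>
    match start with
    | some s => blocks ++ [((s : Int), (last_item : Int))]
    | none => blocks

-- the state relation the induction maintains
def StRel (rest : List String) (i : Nat) (bsA : List (Int × Int)) (inb : Bool) (s : Nat)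
    (bsB : List (Int × Int)) (st : Option Nat) (last : Nat) : Prop :=
  (inb = false ∧ st = none ∧ bsA = bsB)
  ∨ (inb = true ∧ st = some s ∧ bsA = bsB ∧
      (i = last + 1 ∨ ∃ l, aScan rest = some l ∧ is_list_item l = true))
  ∨ (inb = false ∧ ∃ s2, st = some s2 ∧ bsA = bsB ++ [((s2 : Int), (last : Int))] ∧
      (∀ l, aScan rest = some l → is_list_item l = false))

lemma loop_agree (rest : List String) : ∀ (i : Nat) (bsA bsB : List (Int × Int))
    (inb : Bool) (s : Nat) (st : Option Nat) (last : Nat),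
    StRel rest i bsA inb s bsB st last →
    aFinish (aLoop rest i bsA inb s) (i + rest.length) = bFinish (bLoop rest i bsB st last) := by
  induction rest with
  | nil =>
    intro i bsA bsB inb s st last hrel
    rcases hrel with ⟨h1, h2, h3⟩ | ⟨h1, h2, h3, h4⟩ | ⟨h1, s2, h2, h3, h4⟩
    · subst h1 h2 h3; simp [aLoop, bLoop, aFinish, bFinish]
    · rcases h4 with hi | ⟨l, hl, _⟩
      · subst h1 h2 h3 hi
        simp [aLoop, bLoop, aFinish, bFinish]
      · simp [aScan] at hl
    · subst h1 h2 h3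
      simp [aLoop, bLoop, aFinish, bFinish]
  | cons line tl ih =>
    intro i bsA bsB inb s st last hrel
    have hlen : i + (line :: tl).length = (i + 1) + tl.length := by
      simp [Nat.add_comm, Nat.add_left_comm]
    rw [hlen]
    by_cases hitem : is_list_item line = true
    · -- current line is a list item
      rcases hrel with ⟨h1, h2, h3⟩ | ⟨h1, h2, h3, _⟩ | ⟨h1, s2, h2, h3, h4⟩
      · subst h1 h2 h3
        simp only [aLoop, bLoop, hitem, if_true, Bool.not_false]
        exact ih (i + 1) bsA bsA true i (some i) i
          (Or.inr (Or.inl ⟨rfl, rfl, rfl, Or.inl rfl⟩))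
      · subst h1 h2 h3
        simp only [aLoop, bLoop, hitem, if_true, Bool.not_true, Bool.false_eq_true, if_false]
        exact ih (i + 1) bsA bsA true s (some s) i
          (Or.inr (Or.inl ⟨rfl, rfl, rfl, Or.inl rfl⟩))
      · -- mode 3: head cannot be an item
        exfalso
        have hnb : ¬ PySem.Str.strip line = "" := fun hb => by
          rw [blank_not_item line hb] at hitem; exact Bool.false_ne_true hitem
        have : aScan (line :: tl) = some line := by simp [aScan, hnb]
        have := h4 line this
        rw [this] at hitem; exact Bool.false_ne_true hitem
    · by_cases hblank : PySem.Str.strip line = ""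
      · -- blank line
        rcases hrel with ⟨h1, h2, h3⟩ | ⟨h1, h2, h3, h4⟩ | ⟨h1, s2, h2, h3, h4⟩
        · subst h1 h2 h3
          simp only [aLoop, bLoop, hitem, hblank, if_false, Bool.false_and, ne_eq,
            not_true_eq_false]
          exact ih (i + 1) bsA bsA false s none last (Or.inl ⟨rfl, rfl, rfl⟩)
        · -- in a block: A rescans, B skips
          subst h1 h2 h3
          have hscan : aScan (line :: tl) = aScan tl := by simp [aScan, hblank]
          simp only [aLoop, bLoop, hitem, hblank, if_false, Bool.true_and, decide_true,
            if_true, ne_eq, not_true_eq_false]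
          cases hnx : aScan tl with
          | some nxt =>
            by_cases hni : is_list_item nxt = true
            · simp only [hni, if_true]
              exact ih (i + 1) bsA bsA true s (some s) last
                (Or.inr (Or.inl ⟨rfl, rfl, rfl, Or.inr ⟨nxt, hnx, hni⟩⟩))
            · have hi : i = last + 1 := by
                rcases h4 with hi | ⟨l, hl, hil⟩
                · exact hi
                · rw [hscan, hnx] at hl
                  cases hl; exact absurd hil hni
              simp only [hni, Bool.false_eq_true, if_false]
              have hend : (i : Int) - 1 = (last : Int) := by omega
              rw [hend]
              exact ih (i + 1) (bsA ++ [((s : Int), (last : Int))]) bsA false s (some s) last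
                (Or.inr (Or.inr ⟨rfl, s, rfl, rfl, fun l hl => by
                  rw [hnx] at hl; cases hl; exact Bool.not_eq_true _ ▸ (Bool.eq_false_iff.mpr hni)⟩))
          | none =>
            have hi : i = last + 1 := by
              rcases h4 with hi | ⟨l, hl, _⟩
              · exact hi
              · rw [hscan, hnx] at hl; cases hl
            have hend : (i : Int) - 1 = (last : Int) := by omega
            rw [hend]
            exact ih (i + 1) (bsA ++ [((s : Int), (last : Int))]) bsA false s (some s) last
              (Or.inr (Or.inr ⟨rfl, s, rfl, rfl, fun l hl => by rw [hnx] at hl; cases hl⟩))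
        · -- mode 3: blanks pass through
          subst h1 h2 h3
          have hscan : aScan (line :: tl) = aScan tl := by simp [aScan, hblank]
          simp only [aLoop, bLoop, hitem, hblank, if_false, Bool.false_and, ne_eq,
            not_true_eq_false]
          exact ih (i + 1) (bsB ++ [((s2 : Int), (last : Int))]) bsB false s (some s2) last
            (Or.inr (Or.inr ⟨rfl, s2, rfl, rfl, fun l hl => h4 l (hscan ▸ hl)⟩))
      · -- non-blank non-item line
        rcases hrel with ⟨h1, h2, h3⟩ | ⟨h1, h2, h3, h4⟩ | ⟨h1, s2, h2, h3, h4⟩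
        · subst h1 h2 h3
          simp only [aLoop, bLoop, hitem, hblank, Bool.false_and, ne_eq,
            not_false_eq_true, if_true]
          exact ih (i + 1) bsA bsA false s none last (Or.inl ⟨rfl, rfl, rfl⟩)
        · subst h1 h2 h3
          have hi : i = last + 1 := by
            rcases h4 with hi | ⟨l, hl, hil⟩
            · exact hi
            · simp only [aScan, hblank] at hl
              cases hl; exact absurd hil (by simpa using hitem)
          simp only [aLoop, bLoop, hitem, hblank, Bool.true_and, decide_eq_true_eq, if_false,
            if_true, ne_eq, not_false_eq_true]
          have hend : (i : Int) - 1 = (last : Int) := by omega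
          rw [hend]
          exact ih (i + 1) (bsA ++ [((s : Int), (last : Int))])
            (bsA ++ [((s : Int), (last : Int))]) false s none last (Or.inl ⟨rfl, rfl, rfl⟩)
        · subst h1 h2 h3
          simp only [aLoop, bLoop, hitem, hblank, Bool.false_and, ne_eq,
            not_false_eq_true, if_true]
          exact ih (i + 1) (bsB ++ [((s2 : Int), (last : Int))])
            (bsB ++ [((s2 : Int), (last : Int))]) false s none last (Or.inl ⟨rfl, rfl, rfl⟩)


-- ===== VERDICT (by name: the statement is the Claim_ definition above) =====
theorem detect_list_blocks_spec : Claim_equal_detect_list_blocks := by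
  intro lines _
  show detect_list_blocks lines = detect_list_blocks_alt lines
  have h := loop_agree lines 0 [] [] false 0 none 0 (Or.inl ⟨rfl, rfl, rfl⟩)
  simpa [detect_list_blocks, detect_list_blocks_alt, aFinish, bFinish] using h
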